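-- pv_equiv track=rewrite | github.com/tyy99phy/hep_rag | src/hep_rag_v2/fulltext.py | _consume_latex_group
-- ===== SOURCE A (Python) =====
-- def _consume_latex_group(text: str, idx: int) -> tuple[str, int]:
--     idx = _skip_latex_whitespace(text, idx)
--     if idx >= len(text):
--         return "", idx
--     if text[idx] != "{":
--         return text[idx], idx + 1
--
--     start = idx + 1
--     depth = 0
--     idx += 1
--     while idx < len(text):
--         token = text[idx]
--         if token == "{":
--             depth += 1
--         elif token == "}":
--             if depth == 0:
--                 return text[start:idx], idx + 1
--             depth -= 1
--         idx += 1
--     return text[start:], idx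
--
-- def _skip_latex_whitespace(text: str, idx: int) -> int:
--     while idx < len(text) and text[idx].isspace():
--         idx += 1
--     return idx
-- ===== SOURCE B (Python) =====
-- def _consume_latex_group(text: str, idx: int) -> tuple[str, int]:
--     n = len(text)
--     if idx >= n:
--         return "", idx
--     body = text[idx:].lstrip()
--     if not body:
--         return "", n
--     j = n - len(body)          # index of the first non-whitespace character
--     head, tail = body[0], body[1:]
--     if head != "{":
--         return head, j + 1
--     content, used, closed = _split_group(tail, 1)
--     return content, (j + 1 + used + 1) if closed else n
--
--
-- def _split_group(s, depth):
--     """Return (content, chars consumed before the matching close brace, closed?)."""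
--     out = []
--     for k, c in enumerate(s):
--         if c == "}":
--             depth -= 1
--             if depth == 0:
--                 return "".join(out), k, True
--         elif c == "{":
--             depth += 1
--         out.append(c)
--     return "".join(out), len(s), False
-- ===== Notes on version B (the rewrite author's own statement) =====
-- stated objective: alternative
-- what changed: A scans with an index-arithmetic while-loop (manual whitespace skip, depth counter up from 0, final slice by saved indices); B strips the prefix with a slice+lstrip and splits the group by a single recursion over the remaining characters that builds the content as it goes, counting depth down from 1.
-- outside the precondition, e.g. on _consume_latex_group('a', -1): A returns ('a', 0), B returns ('a', 1)
import Mathlib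
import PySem

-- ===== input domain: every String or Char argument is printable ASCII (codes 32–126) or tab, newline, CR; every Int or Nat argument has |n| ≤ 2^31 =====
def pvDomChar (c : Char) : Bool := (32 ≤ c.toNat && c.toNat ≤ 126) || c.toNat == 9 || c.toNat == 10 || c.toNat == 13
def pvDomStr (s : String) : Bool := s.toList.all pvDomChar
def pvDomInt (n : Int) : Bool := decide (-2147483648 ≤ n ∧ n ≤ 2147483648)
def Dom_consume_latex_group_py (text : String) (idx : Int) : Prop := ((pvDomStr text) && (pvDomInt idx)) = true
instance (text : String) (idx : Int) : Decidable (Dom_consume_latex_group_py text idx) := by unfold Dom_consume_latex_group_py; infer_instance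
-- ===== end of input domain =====

-- B replaces A's index-arithmetic while-loop (slice at the end) by a slice+lstrip prefix step and a
-- structural recursion over the remaining characters that builds the group content as it goes (objective: alternative decomposition).

-- ===== PORT A =====
-- while idx < len(text) and text[idx].isspace(): idx += 1
-- (fuel only makes the loop total; s.length + 1 steps always suffice for 0 ≤ idx)
def pvSkipWS (s : List Char) : Nat → Int → Int
  | 0, idx => idx
  | fuel + 1, idx =>
    if idx < (s.length : Int) ∧ ((PySem.List.pyGet? s idx).any PySem.Chars.isspace) then
      pvSkipWS s fuel (idx + 1)
    else idx

-- the while-loop of _consume_latex_group (start, idx, depth are the loop state;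
-- fuel only makes the loop total, and running out of fuel returns like loop exit)
def pvConsumeLoop (s : List Char) : Nat → Int → Int → Int → String × Int
  | 0, start, idx, _ => (String.ofList (PySem.List.slice s (some start) none), idx)
  | fuel + 1, start, idx, depth =>
    if idx < (s.length : Int) then
      let token := PySem.List.pyGetD s idx ' '
      if token = '{' then pvConsumeLoop s fuel start (idx + 1) (depth + 1)
      else if token = '}' then
        if depth = 0 then (String.ofList (PySem.List.slice s (some start) (some idx)), idx + 1)
        else pvConsumeLoop s fuel start (idx + 1) (depth - 1)
      else pvConsumeLoop s fuel start (idx + 1) depth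
    else (String.ofList (PySem.List.slice s (some start) none), idx)

def consume_latex_group_py (text : String) (idx : Int) : String × Int :=
  let s := text.toList
  let idx := pvSkipWS s (s.length + 1) idx
  if idx ≥ (s.length : Int) then ("", idx)
  else
    let c := PySem.List.pyGetD s idx ' '
    if c ≠ '{' then (String.ofList [c], idx + 1)
    else pvConsumeLoop s (s.length + 1) (idx + 1) (idx + 1) 0

-- ===== PORT B =====
-- _split_group(s, depth): returns (content, chars consumed before the matching close brace, closed?)
def pvSplitGroup : List Char → Int → (List Char × Nat × Bool)
  | [], _ => ([], 0, false)
  | c :: s, depth =>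
    if c = '}' then
      if depth - 1 = 0 then ([], 0, true)
      else
        let r := pvSplitGroup s (depth - 1)
        (c :: r.1, r.2.1 + 1, r.2.2)
    else if c = '{' then
      let r := pvSplitGroup s (depth + 1)
      (c :: r.1, r.2.1 + 1, r.2.2)
    else
      let r := pvSplitGroup s depth
      (c :: r.1, r.2.1 + 1, r.2.2)

def consume_latex_group_py_alt (text : String) (idx : Int) : String × Int :=
  let s := text.toList
  let n : Int := s.length
  if idx ≥ n then ("", idx)
  else
    match PySem.Chars.lstrip (PySem.List.slice s (some idx) none) with
    | [] => ("", n)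
    | head :: tail =>
      let j : Int := n - ((head :: tail).length : Int)
      if head ≠ '{' then (String.ofList [head], j + 1)
      else
        let r := pvSplitGroup tail 1
        (String.ofList r.1, if r.2.2 then j + 1 + (r.2.1 : Int) + 1 else n)

-- ===== PRECONDITION & SPEC =====
-- Pre_ excludes negative idx: there A either raises IndexError (idx < -len(text)) or
-- returns a value through Python's accidental negative-index wraparound, which B does not reproduce.
def Pre_consume_latex_group_py (text : String) (idx : Int) : Prop := 0 ≤ idx
instance (text : String) (idx : Int) : Decidable (Pre_consume_latex_group_py text idx) := by
  unfold Pre_consume_latex_group_py; infer_instance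

def pvWitness_consume_latex_group_py : String × Int := (" {a{b}c} rest", 0)

def Spec_consume_latex_group_py (text : String) (idx : Int) (out : String × Int) : Prop :=
  out = consume_latex_group_py_alt text idx
instance (text : String) (idx : Int) (out : String × Int) : Decidable (Spec_consume_latex_group_py text idx out) := by
  unfold Spec_consume_latex_group_py; infer_instance

-- ===== CLAIM (what is proved, stated in full; the proofs are below) =====
def Claim_equal_consume_latex_group_py : Prop := ∀ (text : String) (idx : Int), Dom_consume_latex_group_py text idx → Pre_consume_latex_group_py text idx → Spec_consume_latex_group_py text idx (consume_latex_group_py text idx)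

-- ===== LEMMAS AND PROOFS =====

-- the whitespace skip lands exactly past the characters lstrip removes
theorem pvSkipWS_eq (s : List Char) (fuel : Nat) (idx : Int) (h0 : 0 ≤ idx)
    (h1 : idx ≤ (s.length : Int)) (hf : (s.length : Int) - idx < fuel) :
    pvSkipWS s fuel idx =
      (s.length : Int) - (((s.drop idx.toNat).dropWhile PySem.Chars.isspace).length : Int) := by
  induction fuel generalizing idx with
  | zero => omega
  | succ fuel ih =>
    rw [pvSkipWS]
    rcases eq_or_lt_of_le h1 with heq | hlt
    · have hd : s.drop idx.toNat = [] := by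
        apply List.drop_eq_nil_of_le; omega
      rw [if_neg]
      · rw [hd]; simp; omega
      · intro h; omega
    · have hlen : idx.toNat < s.length := by omega
      have hd : s.drop idx.toNat = s[idx.toNat] :: s.drop (idx.toNat + 1) :=
        List.drop_eq_getElem_cons hlen
      have hget : PySem.List.pyGet? s idx = some s[idx.toNat] := by
        rw [PySem.List.pyGet?_of_nonneg s h0]
        exact List.getElem?_eq_getElem hlen
      by_cases hsp : PySem.Chars.isspace s[idx.toNat]
      · rw [if_pos ⟨hlt, by rw [hget]; simpa using hsp⟩]
        rw [ih (idx + 1) (by omega) (by omega) (by omega)]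
        have : (idx + 1).toNat = idx.toNat + 1 := by omega
        rw [this, hd, List.dropWhile_cons_of_pos (by simpa using hsp)]
      · rw [if_neg]
        · rw [hd, List.dropWhile_cons_of_neg (by simpa using hsp)]
          simp [List.length_drop]; omega
        · rintro ⟨-, hx⟩
          rw [hget] at hx; simp at hx; exact hsp hx

-- helper for pvSplitGroup_content: one cons step preserves the characterisation
theorem pvStep (c : Char) (s : List Char) (r : List Char × Nat × Bool)
    (H : if r.2.2 then r.1 = s.take r.2.1 ∧ r.2.1 < s.length else r.1 = s ∧ r.2.1 = s.length) :
    (if (c :: r.1, r.2.1 + 1, r.2.2).2.2 then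
        (c :: r.1, r.2.1 + 1, r.2.2).1 = (c :: s).take (c :: r.1, r.2.1 + 1, r.2.2).2.1 ∧
          (c :: r.1, r.2.1 + 1, r.2.2).2.1 < (c :: s).length
     else (c :: r.1, r.2.1 + 1, r.2.2).1 = c :: s ∧ (c :: r.1, r.2.1 + 1, r.2.2).2.1 = (c :: s).length) := by
  rcases hb : r.2.2 with _ | _ <;> simp [hb] at H ⊢
  · exact ⟨H.1, by omega⟩
  · exact ⟨H.1, by omega⟩

-- content/length characterisation of pvSplitGroup
theorem pvSplitGroup_content (u : List Char) (d : Int) :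
    (if (pvSplitGroup u d).2.2 then
        (pvSplitGroup u d).1 = u.take (pvSplitGroup u d).2.1 ∧ (pvSplitGroup u d).2.1 < u.length
     else (pvSplitGroup u d).1 = u ∧ (pvSplitGroup u d).2.1 = u.length) := by
  induction u generalizing d with
  | nil => simp [pvSplitGroup]
  | cons c s ih =>
    by_cases h1 : c = '}'
    · by_cases h2 : d - 1 = 0
      · simp [pvSplitGroup, h1, h2]
      · have H := pvStep c s _ (ih (d - 1))
        simp only [pvSplitGroup, if_pos h1, if_neg h2]
        exact H
    · by_cases h3 : c = '{'
      · have H := pvStep c s _ (ih (d + 1))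
        simp only [pvSplitGroup, if_neg h1, if_pos h3]
        exact H
      · have H := pvStep c s _ (ih d)
        simp only [pvSplitGroup, if_neg h1, if_neg h3]
        exact H

-- the A-loop agrees with pvSplitGroup on every suffix
theorem pvConsumeLoop_eq (u : List Char) (s : List Char) (fuel m : Nat) (start d : Int)
    (hm : s.drop m = u) (hmn : m ≤ s.length) (hd : 0 ≤ d) (hf : s.length - m < fuel) :
    pvConsumeLoop s fuel start (m : Int) d =
      (if (pvSplitGroup u (d + 1)).2.2 then
        (String.ofList (PySem.List.slice s (some start) (some ((m : Int) + ((pvSplitGroup u (d + 1)).2.1 : Int)))),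
          (m : Int) + ((pvSplitGroup u (d + 1)).2.1 : Int) + 1)
      else (String.ofList (PySem.List.slice s (some start) none), (s.length : Int))) := by
  induction u generalizing fuel m d with
  | nil =>
    have hms : m = s.length := by
      have := congrArg List.length hm; simp at this; omega
    rcases fuel with _ | fuel
    · rw [pvConsumeLoop]; simp [pvSplitGroup, hms]
    · rw [pvConsumeLoop, if_neg (by omega)]
      simp [pvSplitGroup, hms]
  | cons c u' ih =>
    have hlen : m < s.length := by
      have := congrArg List.length hm; simp at this; omega
    rcases fuel with _ | fuel
    · omega
    have hc : s[m] = c ∧ s.drop (m + 1) = u' := by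
      rw [List.drop_eq_getElem_cons hlen] at hm
      exact ⟨(List.cons.injEq _ _ _ _ ▸ hm).1, (List.cons.injEq _ _ _ _ ▸ hm).2⟩
    have htok : PySem.List.pyGetD s (m : Int) ' ' = c := by
      rw [PySem.List.pyGetD_natCast]
      simp [List.getD, List.getElem?_eq_getElem hlen, hc.1]
    rw [pvConsumeLoop, if_pos (by exact_mod_cast hlen : (m : Int) < (s.length : Int))]
    simp only [htok]
    have hcast : ((m : Int) + 1) = ((m + 1 : Nat) : Int) := by push_cast; ring
    by_cases h1 : c = '}'
    · by_cases h2 : d = 0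
      · subst h2
        rw [if_neg (by simp [h1]), if_pos h1, if_pos rfl]
        simp [pvSplitGroup, h1]
      · rw [if_neg (by simp [h1]), if_pos h1, if_neg h2]
        rw [hcast, ih fuel (m + 1) (d - 1) hc.2 (by omega) (by omega) (by omega)]
        have hs : pvSplitGroup (c :: u') (d + 1) =
            (c :: (pvSplitGroup u' (d + 1 - 1)).1, (pvSplitGroup u' (d + 1 - 1)).2.1 + 1,
              (pvSplitGroup u' (d + 1 - 1)).2.2) := by
          rw [pvSplitGroup, if_pos h1, if_neg (by omega)]
        have hdd : d + 1 - 1 = d - 1 + 1 := by ring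
        rw [hs, hdd]
        rcases hb : (pvSplitGroup u' (d - 1 + 1)).2.2 with _ | _ <;> simp [hb]
        rw [add_assoc, add_comm 1]
        exact ⟨rfl, rfl⟩
    · by_cases h3 : c = '{'
      · rw [if_pos h3, hcast, ih fuel (m + 1) (d + 1) hc.2 (by omega) (by omega) (by omega)]
        have hs : pvSplitGroup (c :: u') (d + 1) =
            (c :: (pvSplitGroup u' (d + 1 + 1)).1, (pvSplitGroup u' (d + 1 + 1)).2.1 + 1,
              (pvSplitGroup u' (d + 1 + 1)).2.2) := by
          rw [pvSplitGroup, if_neg (by simp [h3]), if_pos h3]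
        rw [hs]
        rcases hb : (pvSplitGroup u' (d + 1 + 1)).2.2 with _ | _ <;> simp [hb]
        rw [add_assoc, add_comm 1]
        exact ⟨rfl, rfl⟩
      · rw [if_neg (by simp [h3]), if_neg (by simp [h1]), hcast,
          ih fuel (m + 1) d hc.2 (by omega) hd (by omega)]
        have hs : pvSplitGroup (c :: u') (d + 1) =
            (c :: (pvSplitGroup u' (d + 1)).1, (pvSplitGroup u' (d + 1)).2.1 + 1,
              (pvSplitGroup u' (d + 1)).2.2) := by
          rw [pvSplitGroup, if_neg h1, if_neg h3]
        rw [hs]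
        rcases hb : (pvSplitGroup u' (d + 1)).2.2 with _ | _ <;> simp [hb]
        rw [add_assoc, add_comm 1]
        exact ⟨rfl, rfl⟩

-- a suffix of s equals the drop at its offset
theorem pv_drop_of_suffix (s u : List Char) (h : u <:+ s) :
    s.drop (s.length - u.length) = u := by
  obtain ⟨t, rfl⟩ := h
  simp

-- ===== VERDICT (by name: the statement is the Claim_ definition above) =====
theorem consume_latex_group_py_spec : Claim_equal_consume_latex_group_py := by
  intro text idx _hdom hpre
  unfold Spec_consume_latex_group_py
  have hpre' : (0 : Int) ≤ idx := hpre
  set s : List Char := text.toList with hs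
  by_cases hbig : idx ≥ (s.length : Int)
  · -- idx ≥ n: the skip loop exits at once, both return ("", idx)
    have hskip : pvSkipWS s (s.length + 1) idx = idx := by
      rw [pvSkipWS, if_neg]; rintro ⟨h, -⟩; omega
    simp only [consume_latex_group_py, consume_latex_group_py_alt, ← hs, hskip]
    rw [if_pos hbig, if_pos hbig]
  · push_neg at hbig
    have hskip := pvSkipWS_eq s (s.length + 1) idx hpre' (le_of_lt hbig) (by omega)
    have hsl : PySem.List.slice s (some idx) none = s.drop idx.toNat :=
      PySem.List.slice_from s hpre'
    have hlst : PySem.Chars.lstrip (s.drop idx.toNat)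
        = (s.drop idx.toNat).dropWhile PySem.Chars.isspace := rfl
    set body : List Char := (s.drop idx.toNat).dropWhile PySem.Chars.isspace with hbody
    have hsuf : body <:+ s :=
      (List.dropWhile_suffix _).trans (List.drop_suffix _ _)
    have hblen : body.length ≤ s.length := List.IsSuffix.length_le hsuf
    have hdropb : s.drop (s.length - body.length) = body := pv_drop_of_suffix s body hsuf
    simp only [consume_latex_group_py, consume_latex_group_py_alt, ← hs,
      if_neg (by omega : ¬ idx ≥ (s.length : Int)), hskip, hsl, hlst]
    rcases hb : body with _ | ⟨head, tail⟩
    · -- all whitespace from idx on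
      rw [if_pos (by simp)]
      simp
    · -- body = head :: tail; let mN be the index of head in s
      rw [hb] at hdropb hblen hskip
      set mN : Nat := s.length - (head :: tail).length with hmN
      have hmlt : mN < s.length := by
        have : 1 ≤ (head :: tail).length := by simp
        omega
      have hmcast : (s.length : Int) - (((head :: tail).length : Nat) : Int) = (mN : Int) := by
        omega
      have hgm : s[mN] = head ∧ s.drop (mN + 1) = tail := by
        rw [List.drop_eq_getElem_cons hmlt] at hdropb
        exact ⟨(List.cons.injEq _ _ _ _ ▸ hdropb).1, (List.cons.injEq _ _ _ _ ▸ hdropb).2⟩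
      rw [if_neg (by omega)]
      have htok : PySem.List.pyGetD s ((s.length : Int) - (((head :: tail).length : Nat) : Int)) ' ' = head := by
        rw [hmcast, PySem.List.pyGetD_natCast]
        simp [List.getD, List.getElem?_eq_getElem hmlt, hgm.1]
      rw [htok]
      by_cases hbr : head = '{'
      · rw [if_neg (by simp [hbr])]
        have hloop := pvConsumeLoop_eq tail s (s.length + 1) (mN + 1)
          (((mN + 1 : Nat) : Int)) 0 hgm.2 (by omega) le_rfl (by omega)
        rw [show ((0:Int) + 1) = 1 from rfl] at hloop
        have hcast1 : ((s.length : Int) - (((head :: tail).length : Nat) : Int) + 1) = ((mN + 1 : Nat) : Int) := by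
          omega
        rw [hcast1, hloop]
        have hcont := pvSplitGroup_content tail 1
        rcases hcl : (pvSplitGroup tail 1).2.2 with _ | _
        · rw [hcl] at hcont
          simp only [Bool.false_eq_true, if_false] at hcont ⊢
          have hsl1 : PySem.List.slice s (some ((mN + 1 : Nat) : Int)) none = s.drop (mN + 1) :=
            PySem.List.slice_from_natCast s (mN + 1)
          rw [hsl1, hgm.2]
          simp [hbr, hcl, hcont.1]
        · rw [hcl] at hcont
          simp only [if_true] at hcont
          set k : Nat := (pvSplitGroup tail 1).2.1 with hk
          have hsl2 : PySem.List.slice s (some ((mN + 1 : Nat) : Int))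
              (some (((mN + 1 : Nat) : Int) + (k : Int))) = (s.drop (mN + 1)).take k :=
            PySem.List.slice_natCast_add s (mN + 1) k
          rw [hsl2, hgm.2]
          simp [hbr, hcont.1, hcl]
          have h5 : (head :: tail).length = tail.length + 1 := by simp
          omega
      · rw [if_pos (by simp [hbr])]
        simp [hbr]
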